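-- pv_equiv track=rewrite | github.com/verwirrtsx/pygame | five/index.py | x_line
-- ===== SOURCE A (Python) =====
-- def x_line(who):
-- 	x_count = 0
-- 	last_x = who[-1][0]
-- 	last_y = who[-1][1]
-- 	for i in range(4):
-- 		if [(i+1)*50 + last_x,last_y] in who:
-- 			x_count =x_count+1
-- 		if [last_x - (i+1)*50 ,last_y] in who:
-- 			x_count =x_count+1
-- 	if x_count >3:
-- 		return True
-- 	else:
-- 		return False
-- ===== SOURCE B (Python) =====
-- def x_line(who):
--     lx = who[-1][0]
--     ly = who[-1][1]
--     ks = set()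
--     for p in who:
--         if len(p) == 2 and p[1] == ly:
--             d = p[0] - lx
--             if d % 50 == 0:
--                 k = d // 50
--                 if 1 <= abs(k) <= 4:
--                     ks.add(k)
--     return len(ks) > 3
-- ===== Notes on version B (the rewrite author's own statement) =====
-- stated objective: alternative
-- what changed: A probes each of the 8 target positions with a list-membership scan inside a range(4) loop; B never builds or searches for targets: it scans `who` once, arithmetically decodes each point into its row offset k = (x-lx)//50 and collects the valid offsets (|k| in 1..4, same y, divisible by 50) in a set, returning len(set) > 3.
import Mathlib
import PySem

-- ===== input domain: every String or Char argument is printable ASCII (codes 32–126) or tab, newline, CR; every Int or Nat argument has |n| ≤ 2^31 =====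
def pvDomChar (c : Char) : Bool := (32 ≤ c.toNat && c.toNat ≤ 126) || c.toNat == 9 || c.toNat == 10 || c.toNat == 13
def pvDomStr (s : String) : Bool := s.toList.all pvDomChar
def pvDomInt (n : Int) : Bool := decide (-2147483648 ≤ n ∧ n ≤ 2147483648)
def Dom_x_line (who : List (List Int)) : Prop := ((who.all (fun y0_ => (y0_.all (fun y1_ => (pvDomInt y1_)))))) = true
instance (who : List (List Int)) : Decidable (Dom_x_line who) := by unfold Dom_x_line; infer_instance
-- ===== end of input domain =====

-- B replaces A's 8 target-membership scans by one scan that arithmetically decodes each point's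
-- row offset (x-lx)//50 into a set of hit offsets (objective: alternative).

-- ===== PORT A =====
-- who[-1][0]/[1] raise IndexError on empty `who` or a short last row; those inputs are outside Pre_,
-- the `.getD` defaults below are never reached under Pre_.
def x_line (who : List (List Int)) : Bool :=
  let last_x := ((PySem.List.pyGet? who (-1)).getD []).headD 0
  let last_y := (PySem.List.pyGet? ((PySem.List.pyGet? who (-1)).getD []) 1).getD 0
  let x_count : Int := (PySem.List.pyRange 0 4 1).foldl (fun c i =>
    let c := if [(i+1)*50 + last_x, last_y] ∈ who then c + 1 else c
    if [last_x - (i+1)*50, last_y] ∈ who then c + 1 else c) 0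
  if x_count > 3 then true else false

-- ===== PORT B =====
-- the loop body of Source B: decode p into its offset k and add it to the hit set when valid
def xLineStep (lx ly : Int) (ks : PySem.Set Int) (p : List Int) : PySem.Set Int :=
  match p with
  | [a, b] =>
    if b = ly then
      if PySem.Int.mod (a - lx) 50 = 0 then
        if 1 ≤ |PySem.Int.floordiv (a - lx) 50| ∧ |PySem.Int.floordiv (a - lx) 50| ≤ 4 then
          PySem.Set.add ks (PySem.Int.floordiv (a - lx) 50)
        else ks
      else ks
    else ks
  | _ => ks

def x_line_alt (who : List (List Int)) : Bool :=
  let lx := ((PySem.List.pyGet? who (-1)).getD []).headD 0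
  let ly := (PySem.List.pyGet? ((PySem.List.pyGet? who (-1)).getD []) 1).getD 0
  let ks : PySem.Set Int := who.foldl (xLineStep lx ly) PySem.Set.empty
  decide (PySem.Set.len ks > 3)

-- ===== PRECONDITION & SPEC =====
-- Pre_ excludes exactly the inputs where A raises IndexError: empty `who` or last row shorter than 2.
def Pre_x_line (who : List (List Int)) : Prop := who ≠ [] ∧ 2 ≤ (who.getLastD []).length
instance (who : List (List Int)) : Decidable (Pre_x_line who) := by unfold Pre_x_line; infer_instance
def pvWitness_x_line : List (List Int) := [[0, 0], [50, 0], [100, 0]]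

def Spec_x_line (who : List (List Int)) (out : Bool) : Prop := out = x_line_alt who
instance (who : List (List Int)) (out : Bool) : Decidable (Spec_x_line who out) := by unfold Spec_x_line; infer_instance

-- ===== CLAIM (what is proved, stated in full; the proofs are below) =====
def Claim_equal_x_line : Prop := ∀ (who : List (List Int)), Dom_x_line who → Pre_x_line who → Spec_x_line who (x_line who)

-- ===== LEMMAS AND PROOFS =====

-- a point decodes to offset k exactly when it IS the target [lx + 50k, ly]
theorem xLineStep_mem (lx ly : Int) (ks : PySem.Set Int) (p : List Int) (k : Int) :
    (k ∈ xLineStep lx ly ks p) ↔ k ∈ ks ∨ ((1 ≤ |k| ∧ |k| ≤ 4) ∧ p = [lx + 50 * k, ly]) := by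
  have h50 : (0:Int) < 50 := by omega
  match p with
  | [] => simp [xLineStep]
  | [a] => simp [xLineStep]
  | (a :: b :: c :: t) => simp [xLineStep]
  | [a, b] =>
    have hiff : ([a, b] = [lx + 50 * k, ly]) ↔ (a = lx + 50 * k ∧ b = ly) := by
      constructor
      · intro h
        injection h with h1 h2
        injection h2 with h2 _
        exact ⟨h1, h2⟩
      · rintro ⟨rfl, rfl⟩; rfl
    simp only [xLineStep, PySem.Int.mod_eq_emod_of_pos h50, PySem.Int.floordiv_eq_ediv_of_pos h50,
      Int.abs_eq_natAbs, hiff]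
    split_ifs with hb hm hk
    · rw [PySem.Set.mem_add]
      constructor
      · rintro (h | rfl)
        · exact Or.inl h
        · exact Or.inr ⟨hk, by omega, hb⟩
      · rintro (h | ⟨hkk, ha, -⟩)
        · exact Or.inl h
        · have hke : k = (a - lx) / 50 := by omega
          rw [hke]; exact Or.inr rfl
    · constructor
      · exact Or.inl
      · rintro (h | ⟨hkk, ha, -⟩)
        · exact h
        · exact absurd (by constructor <;> omega) hk
    · constructor
      · exact Or.inl
      · rintro (h | ⟨hkk, ha, -⟩)
        · exact h
        · exact absurd (by omega) hm
    · constructor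
      · exact Or.inl
      · rintro (h | ⟨hkk, ha, hb2⟩)
        · exact h
        · exact absurd hb2 hb

theorem fold_mem (lx ly : Int) :
    ∀ (who : List (List Int)) (s : PySem.Set Int) (k : Int),
      (k ∈ who.foldl (xLineStep lx ly) s) ↔
        k ∈ s ∨ ((1 ≤ |k| ∧ |k| ≤ 4) ∧ [lx + 50 * k, ly] ∈ who) := by
  intro who
  induction who with
  | nil => intro s k; simp
  | cons p who ih =>
    intro s k
    simp only [List.foldl_cons, ih, xLineStep_mem, List.mem_cons]
    constructor
    · rintro ((h | ⟨hb, rfl⟩) | ⟨hb, h⟩)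
      · exact Or.inl h
      · exact Or.inr ⟨hb, Or.inl rfl⟩
      · exact Or.inr ⟨hb, Or.inr h⟩
    · rintro (h | ⟨hb, (h | h)⟩)
      · exact Or.inl (Or.inl h)
      · exact Or.inl (Or.inr ⟨hb, h.symm⟩)
      · exact Or.inr ⟨hb, h⟩

theorem fold_nodup (lx ly : Int) :
    ∀ (who : List (List Int)) (s : PySem.Set Int), s.Nodup →
      (who.foldl (xLineStep lx ly) s).Nodup := by
  intro who
  induction who with
  | nil => intro s h; simpa
  | cons p who ih =>
    intro s h
    apply ih
    match p with
    | [] => exact h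
    | [a] => exact h
    | (a :: b :: c :: t) => exact h
    | [a, b] =>
      simp only [xLineStep]
      split_ifs with h1 h2 h3
      · exact PySem.Set.nodup_add _ _ h
      · exact h
      · exact h
      · exact h
    
-- the hit set is a permutation of the filtered offset universe, so its length is the hit count
theorem fold_length (lx ly : Int) (who : List (List Int)) :
    (who.foldl (xLineStep lx ly) PySem.Set.empty).length
      = (([-4, -3, -2, -1, 1, 2, 3, 4] : List Int).filter
          (fun k => decide ([lx + 50 * k, ly] ∈ who))).length := by
  apply List.Perm.length_eq
  rw [List.perm_ext_iff_of_nodup (fold_nodup lx ly who _ (by simp [PySem.Set.empty]))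
    (List.Nodup.filter _ (by decide))]
  intro k
  rw [fold_mem, List.mem_filter]
  simp only [PySem.Set.empty, List.not_mem_nil, false_or, decide_eq_true_eq]
  constructor
  · rintro ⟨⟨h1, h2⟩, h⟩
    rw [Int.abs_eq_natAbs] at h1 h2
    exact ⟨by simp; omega, h⟩
  · rintro ⟨hu, h⟩
    simp only [List.mem_cons, List.not_mem_nil, or_false] at hu
    refine ⟨⟨?_, ?_⟩, h⟩ <;> rw [Int.abs_eq_natAbs] <;> omega

theorem ite_incr (P : Prop) [Decidable P] (c : Int) :
    (if P then c + 1 else c) = c + (if P then 1 else 0) := by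
  split_ifs <;> ring

set_option maxHeartbeats 2000000 in
theorem x_line_key (who : List (List Int)) (lx ly : Int) :
    (if ((PySem.List.pyRange 0 4 1).foldl (fun c i =>
        let c := if [(i+1)*50 + lx, ly] ∈ who then c + 1 else c
        if [lx - (i+1)*50, ly] ∈ who then c + 1 else c) (0:Int)) > 3 then true else false)
    = decide (PySem.Set.len (who.foldl (xLineStep lx ly) PySem.Set.empty) > 3) := by
  have hr1 : PySem.List.pyRange 0 4 1 = [0, 1, 2, 3] := by decide
  rw [hr1]
  have hlen : PySem.Set.len (who.foldl (xLineStep lx ly) PySem.Set.empty)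
      = ((([-4, -3, -2, -1, 1, 2, 3, 4] : List Int).filter
          (fun k => decide ([lx + 50 * k, ly] ∈ who))).length : Int) := by
    unfold PySem.Set.len
    rw [fold_length]
  rw [hlen]
  simp only [List.foldl]
  have a1 : ((0:Int)+1)*50 + lx = lx + 50 * 1 := by ring
  have a2 : lx - ((0:Int)+1)*50 = lx + 50 * -1 := by ring
  have a3 : ((1:Int)+1)*50 + lx = lx + 50 * 2 := by ring
  have a4 : lx - ((1:Int)+1)*50 = lx + 50 * -2 := by ring
  have a5 : ((2:Int)+1)*50 + lx = lx + 50 * 3 := by ring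
  have a6 : lx - ((2:Int)+1)*50 = lx + 50 * -3 := by ring
  have a7 : ((3:Int)+1)*50 + lx = lx + 50 * 4 := by ring
  have a8 : lx - ((3:Int)+1)*50 = lx + 50 * -4 := by ring
  rw [a1, a2, a3, a4, a5, a6, a7, a8]
  simp only [ite_incr]
  by_cases h1 : [lx + 50, ly] ∈ who <;>
  by_cases h2 : [lx + -50, ly] ∈ who <;>
  by_cases h3 : [lx + 100, ly] ∈ who <;>
  by_cases h4 : [lx + -100, ly] ∈ who <;>
  by_cases h5 : [lx + 150, ly] ∈ who <;>
  by_cases h6 : [lx + -150, ly] ∈ who <;>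
  by_cases h7 : [lx + 200, ly] ∈ who <;>
  by_cases h8 : [lx + -200, ly] ∈ who <;>
  simp [List.filter, h1, h2, h3, h4, h5, h6, h7, h8]

-- ===== VERDICT (by name: the statement is the Claim_ definition above) =====
theorem x_line_spec : Claim_equal_x_line := by
  unfold Claim_equal_x_line
  intro who _ _
  unfold Spec_x_line x_line x_line_alt
  exact x_line_key who _ _
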